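-- pv_equiv track=rewrite | github.com/iminurnamez/dungeoneer | data/components/dungeon.py | number_rooms
-- ===== SOURCE A (Python) =====
-- def number_rooms(branches):
--     total = sum(branches)
--     branch_rooms = []
--     current = 0
--     for b in branches:
--         branch = []
--         for x in range(b):
--             branch.append(current)
--             current += 1
--         branch_rooms.append(branch)
--     return branch_rooms
-- ===== SOURCE B (Python) =====
-- def number_rooms(branches):
--     def go(start, rest):
--         if not rest:
--             return []
--         block = list(range(start, start + rest[0]))
--         return [block] + go(start + len(block), rest[1:])
--     return go(0, branches)
-- ===== Notes on version B (the rewrite author's own statement) =====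
-- stated objective: simpler
-- what changed: Replaces the nested loops with a mutable running counter by structural recursion that builds each block directly as range(start, start+b) and starts the next block where this one ended (start + len(block)).
import Mathlib
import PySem

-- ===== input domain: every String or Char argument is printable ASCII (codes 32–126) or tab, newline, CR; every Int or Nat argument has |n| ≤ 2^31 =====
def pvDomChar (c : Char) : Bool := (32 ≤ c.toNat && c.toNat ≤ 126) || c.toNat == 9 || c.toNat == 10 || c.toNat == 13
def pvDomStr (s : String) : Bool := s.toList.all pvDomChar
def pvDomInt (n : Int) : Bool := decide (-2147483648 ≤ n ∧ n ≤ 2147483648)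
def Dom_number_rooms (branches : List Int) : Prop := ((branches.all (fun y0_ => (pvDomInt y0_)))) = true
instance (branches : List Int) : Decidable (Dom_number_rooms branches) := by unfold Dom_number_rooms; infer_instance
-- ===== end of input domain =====

-- B replaces the nested loops with a mutable running counter by structural recursion
-- that builds each block directly as range(start, start+b) and starts the next block
-- where this one ended (objective: simpler).

-- ===== PORT A =====
def number_rooms (branches : List Int) : List (List Int) :=
  let _total := branches.sum
  let st := branches.foldl
    (fun (st : List (List Int) × Int) b =>
      let inner := (PySem.List.pyRange 0 b 1).foldl
        (fun (s : List Int × Int) _ => (s.1 ++ [s.2], s.2 + 1)) ([], st.2)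
      (st.1 ++ [inner.1], inner.2))
    ([], 0)
  st.1

-- ===== PORT B =====
-- helper 'go' of Source B: recursion on the list of branch sizes
def pvGo (start : Int) : List Int → List (List Int)
  | [] => []
  | b :: rest =>
    let block := PySem.List.pyRange start (start + b) 1
    [block] ++ pvGo (start + block.length) rest

def number_rooms_alt (branches : List Int) : List (List Int) := pvGo 0 branches

-- ===== PRECONDITION & SPEC =====
def Spec_number_rooms (branches : List Int) (out : List (List Int)) : Prop := out = number_rooms_alt branches
instance (branches : List Int) (out : List (List Int)) : Decidable (Spec_number_rooms branches out) := by unfold Spec_number_rooms; infer_instance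

-- ===== CLAIM (what is proved, stated in full; the proofs are below) =====
def Claim_equal_number_rooms : Prop := ∀ (branches : List Int), Dom_number_rooms branches → Spec_number_rooms branches (number_rooms branches)

-- ===== LEMMAS AND PROOFS =====

lemma pv_inner (xs : List Int) : ∀ (l : List Int) (c : Int),
    xs.foldl (fun (s : List Int × Int) _ => (s.1 ++ [s.2], s.2 + 1)) (l, c)
      = (l ++ PySem.List.pyRange c (c + xs.length) 1, c + xs.length) := by
  induction xs with
  | nil => intro l c; simp
  | cons x xs ih =>
    intro l c
    simp only [List.foldl_cons, List.length_cons]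
    rw [ih (l ++ [c]) (c + 1)]
    have h1 : (c + 1) + (xs.length : Int) = c + ((xs.length : Int) + 1) := by ring
    have h2 : PySem.List.pyRange c (c + ((xs.length : Int) + 1)) 1
        = c :: PySem.List.pyRange (c + 1) (c + ((xs.length : Int) + 1)) 1 := by
      exact PySem.List.pyRange_one_cons (by omega)
    push_cast
    rw [h1, h2]
    simp

lemma pv_range_len (c b : Int) :
    ((PySem.List.pyRange c (c + b) 1).length : Int) = max b 0 := by
  rw [PySem.List.length_pyRange_one]
  omega

lemma pv_range_max (c b : Int) :
    PySem.List.pyRange c (c + max b 0) 1 = PySem.List.pyRange c (c + b) 1 := by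
  rw [PySem.List.pyRange_one, PySem.List.pyRange_one]
  have : (c + max b 0 - c).toNat = (c + b - c).toNat := by omega
  rw [this]

lemma pv_foldA (bs : List Int) : ∀ (acc : List (List Int)) (c : Int),
    bs.foldl
      (fun (st : List (List Int) × Int) b =>
        let inner := (PySem.List.pyRange 0 b 1).foldl
          (fun (s : List Int × Int) _ => (s.1 ++ [s.2], s.2 + 1)) ([], st.2)
        (st.1 ++ [inner.1], inner.2))
      (acc, c)
      = (acc ++ pvGo c bs, c + ((bs.map (fun b => max b 0)).sum)) := by
  induction bs with
  | nil => intro acc c; simp [pvGo]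
  | cons b bs ih =>
    intro acc c
    simp only [List.foldl_cons]
    rw [pv_inner]
    have hlen : ((PySem.List.pyRange 0 b 1).length : Int) = max b 0 := by
      rw [PySem.List.length_pyRange_one]
      omega
    rw [hlen, pv_range_max, ih]
    simp only [pvGo, List.map_cons, List.sum_cons]
    rw [pv_range_len c b, Prod.mk.injEq]
    exact ⟨by simp, by ring⟩

lemma pv_A_eq_go (bs : List Int) : number_rooms bs = pvGo 0 bs := by
  unfold number_rooms
  simp only []
  rw [pv_foldA]
  simp

-- ===== VERDICT (by name: the statement is the Claim_ definition above) =====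
theorem number_rooms_spec : Claim_equal_number_rooms := by
  intro branches _
  unfold Spec_number_rooms number_rooms_alt
  exact pv_A_eq_go branches
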